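-- pv_equiv track=rewrite | github.com/artinSha/RingApp-Backend | app.py | _extract_user_utterances
-- ===== SOURCE A (Python) =====
-- def _extract_user_utterances(conversation_doc, max_chars: int = 6000) -> str:
--     """
--     Return a single string with only the user's utterances, newest last.
--     Soft-limit total chars to keep prompts reasonable.
--     """
--     buf = []
--     total = 0
--     for t in conversation_doc.get("conversation", []):
--         ut = (t.get("user_text") or "").strip()
--         if ut:
--             if total + len(ut) > max_chars:
--                 # Simple truncation from the start if too long
--                 # Keep the most recent parts by popping from the beginning
--                 while buf and (total + len(ut) > max_chars):
--                     removed = buf.pop(0)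
--                     total -= len(removed)
--             buf.append(ut)
--             total += len(ut)
--     return "\n".join(f"- {u}" for u in buf) if buf else "(no user speech captured)"
-- ===== SOURCE B (Python) =====
-- def _extract_user_utterances(conversation_doc, max_chars: int = 6000) -> str:
--     """
--     Return a single string with only the user's utterances, newest last.
--     Soft-limit total chars to keep prompts reasonable.
--     """
--     uts = []
--     for t in conversation_doc.get("conversation", []):
--         ut = (t.get("user_text") or "").strip()
--         if ut:
--             uts.append(ut)
--     selected = []
--     total = 0
--     for u in reversed(uts):
--         if selected and total + len(u) > max_chars:
--             break
--         selected.append(u)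
--         total += len(u)
--     if not selected:
--         return "(no user speech captured)"
--     return "\n".join(f"- {u}" for u in reversed(selected))
-- ===== Notes on version B (the rewrite author's own statement) =====
-- stated objective: simpler
-- what changed: Replaces the forward pass with in-loop front-eviction of the running buffer by two plain phases: collect all non-empty stripped utterances, then one backward accumulation that keeps the newest utterances while they fit (always keeping the newest one).
import Mathlib
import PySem

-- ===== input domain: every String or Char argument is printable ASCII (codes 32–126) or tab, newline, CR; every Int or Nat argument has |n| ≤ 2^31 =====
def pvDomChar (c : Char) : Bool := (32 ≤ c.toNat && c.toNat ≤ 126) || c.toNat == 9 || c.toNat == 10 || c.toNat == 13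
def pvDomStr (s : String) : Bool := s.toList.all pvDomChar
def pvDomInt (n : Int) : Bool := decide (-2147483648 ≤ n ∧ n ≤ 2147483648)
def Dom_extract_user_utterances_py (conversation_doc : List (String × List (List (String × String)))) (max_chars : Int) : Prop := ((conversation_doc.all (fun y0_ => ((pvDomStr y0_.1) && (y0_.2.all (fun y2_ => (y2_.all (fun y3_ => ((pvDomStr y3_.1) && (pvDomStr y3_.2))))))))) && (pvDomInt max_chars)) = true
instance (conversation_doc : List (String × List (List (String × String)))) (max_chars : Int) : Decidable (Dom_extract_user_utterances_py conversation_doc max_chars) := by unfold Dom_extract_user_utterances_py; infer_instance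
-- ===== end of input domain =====

-- B replaces A's forward pass with in-loop front-eviction by two plain phases:
-- collect the non-empty stripped utterances, then one backward accumulation keeping
-- the newest utterances while they fit (objective: simpler).


-- ===== PORT A =====
-- the inner 'while buf and (total + len(ut) > max_chars): removed = buf.pop(0); total -= len(removed)'
def euA_while (mc lu : Int) : List String → Int → List String × Int
  | [], total => ([], total)
  | b :: bs, total =>
    if total + lu > mc then euA_while mc lu bs (total - PySem.Str.len b)
    else (b :: bs, total)

-- one iteration of A's 'for t in conversation_doc.get("conversation", [])' body
def euA_step (mc : Int) (st : List String × Int) (t : List (String × String)) : List String × Int :=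
  let ut := PySem.Str.strip (((PySem.Dict.mk t).get? "user_text").getD "")
  if ut = "" then st
  else
    let lu := PySem.Str.len ut
    let st2 := if st.2 + lu > mc then euA_while mc lu st.1 st.2 else st
    (st2.1 ++ [ut], st2.2 + lu)

def extract_user_utterances_py (conversation_doc : List (String × List (List (String × String)))) (max_chars : Int) : String :=
  let conv := (PySem.Dict.mk conversation_doc).getD "conversation" []
  let buf := (conv.foldl (euA_step max_chars) ([], 0)).1
  if buf = [] then "(no user speech captured)"
  else PySem.Str.join "\n" (buf.map (fun u => "- " ++ u))

-- ===== PORT B =====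
-- 'for u in reversed(uts): if selected and total + len(u) > max_chars: break; selected.append(u); total += len(u)'
def euB_pick (mc : Int) : List String → List String → Int → List String
  | [], sel, _ => sel
  | u :: rest, sel, total =>
    if sel ≠ [] ∧ total + PySem.Str.len u > mc then sel
    else euB_pick mc rest (sel ++ [u]) (total + PySem.Str.len u)

def extract_user_utterances_py_alt (conversation_doc : List (String × List (List (String × String)))) (max_chars : Int) : String :=
  let conv := (PySem.Dict.mk conversation_doc).getD "conversation" []
  let uts := conv.foldl (fun acc t =>
      let ut := PySem.Str.strip (((PySem.Dict.mk t).get? "user_text").getD "")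
      if ut = "" then acc else acc ++ [ut]) []
  let sel := euB_pick max_chars uts.reverse [] 0
  if sel = [] then "(no user speech captured)"
  else PySem.Str.join "\n" (sel.reverse.map (fun u => "- " ++ u))

-- ===== PRECONDITION & SPEC =====
def Spec_extract_user_utterances_py (conversation_doc : List (String × List (List (String × String)))) (max_chars : Int) (out : String) : Prop := out = extract_user_utterances_py_alt conversation_doc max_chars
instance (conversation_doc : List (String × List (List (String × String)))) (max_chars : Int) (out : String) : Decidable (Spec_extract_user_utterances_py conversation_doc max_chars out) := by unfold Spec_extract_user_utterances_py; infer_instance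

-- ===== CLAIM (what is proved, stated in full; the proofs are below) =====
def Claim_equal_extract_user_utterances_py : Prop := ∀ (conversation_doc : List (String × List (List (String × String)))) (max_chars : Int), Dom_extract_user_utterances_py conversation_doc max_chars → Spec_extract_user_utterances_py conversation_doc max_chars (extract_user_utterances_py conversation_doc max_chars)

-- ===== LEMMAS AND PROOFS =====

-- total length of a list of strings
def euLenSum (xs : List String) : Int := (xs.map PySem.Str.len).sum

-- spec of the backward take: from running total t, keep a prefix of the
-- newest-first list while it still fits
def euPickR (mc : Int) : List String → Int → List String
  | [], _ => []
  | u :: rest, t =>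
    if t + PySem.Str.len u > mc then [] else u :: euPickR mc rest (t + PySem.Str.len u)

theorem euLenSum_nonneg (xs : List String) : 0 ≤ euLenSum xs := by
  induction xs with
  | nil => simp [euLenSum]
  | cons a as ih =>
    simp only [euLenSum, List.map_cons, List.sum_cons, PySem.Str.len_eq] at *
    positivity

theorem euLenSum_cons (a : String) (as : List String) :
    euLenSum (a :: as) = (a.length : Int) + euLenSum as := by
  simp [euLenSum, PySem.Str.len_eq]

theorem euLenSum_reverse (xs : List String) : euLenSum xs.reverse = euLenSum xs := by
  simp [euLenSum]

theorem euPickR_cons (mc : Int) (u : String) (rest : List String) (t : Int) :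
    euPickR mc (u :: rest) t =
      if mc < t + (u.length : Int) then [] else u :: euPickR mc rest (t + (u.length : Int)) := rfl

-- idempotence of the pick under a larger running total
theorem euPickR_pickR (mc : Int) (xs : List String) : ∀ t t' : Int, t ≤ t' →
    euPickR mc (euPickR mc xs t) t' = euPickR mc xs t' := by
  induction xs with
  | nil => intro t t' _; simp [euPickR]
  | cons a as ih =>
    intro t t' htt
    rw [euPickR_cons, euPickR_cons]
    by_cases h : mc < t + (a.length : Int)
    · rw [if_pos h, if_pos (by omega)]
      simp [euPickR]
    · rw [if_neg h]
      by_cases h' : mc < t' + (a.length : Int)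
      · rw [if_pos h', euPickR_cons, if_pos h']
      · rw [if_neg h', euPickR_cons, if_neg h', ih (t + (a.length : Int)) (t' + (a.length : Int)) (by omega)]

-- pick of an appended list
theorem euPickR_append (mc : Int) (xs ys : List String) : ∀ t : Int,
    euPickR mc (xs ++ ys) t =
      if euPickR mc xs t = xs then xs ++ euPickR mc ys (t + euLenSum xs)
      else euPickR mc xs t := by
  induction xs with
  | nil => intro t; simp [euPickR, euLenSum]
  | cons a as ih =>
    intro t
    rw [List.cons_append, euPickR_cons, euPickR_cons]
    by_cases h : mc < t + (a.length : Int)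
    · rw [if_pos h, if_pos h, if_neg (by simp : ¬([] : List String) = a :: as)]
    · rw [if_neg h, if_neg h, ih (t + (a.length : Int))]
      have hsum : t + euLenSum (a :: as) = t + (a.length : Int) + euLenSum as := by
        rw [euLenSum_cons]; ring
      by_cases heq : euPickR mc as (t + (a.length : Int)) = as
      · rw [if_pos heq, if_pos (by rw [heq]), hsum]
        simp
      · rw [if_neg heq, if_neg (by simp [heq])]

-- when everything fits, everything is kept
theorem euPickR_all (mc : Int) (xs : List String) : ∀ t : Int, euLenSum xs + t ≤ mc →
    euPickR mc xs t = xs := by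
  induction xs with
  | nil => intro t _; simp [euPickR]
  | cons a as ih =>
    intro t hfit
    have has := euLenSum_nonneg as
    have hsum := euLenSum_cons a as
    rw [euPickR_cons, if_neg (by omega : ¬ mc < t + (a.length : Int)),
      ih (t + (a.length : Int)) (by omega)]

theorem euA_while_cons (mc lu : Int) (b : String) (bs : List String) (total : Int) :
    euA_while mc lu (b :: bs) total =
      if mc < total + lu then euA_while mc lu bs (total - (b.length : Int)) else (b :: bs, total) := rfl

-- A's while loop computes the backward pick of its buffer
theorem euA_while_eq (mc lu : Int) (buf : List String) :
    euA_while mc lu buf (euLenSum buf) =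
      ((euPickR mc buf.reverse lu).reverse, euLenSum (euPickR mc buf.reverse lu)) := by
  induction buf with
  | nil => simp [euA_while, euPickR, euLenSum]
  | cons b bs ih =>
    have hsum := euLenSum_cons b bs
    have hrevsum := euLenSum_reverse bs
    rw [euA_while_cons]
    by_cases h : mc < euLenSum (b :: bs) + lu
    · rw [if_pos h]
      have hrec : euLenSum (b :: bs) - (b.length : Int) = euLenSum bs := by omega
      have hdrop : euPickR mc ((b :: bs).reverse) lu = euPickR mc bs.reverse lu := by
        rw [List.reverse_cons, euPickR_append]
        by_cases heq : euPickR mc bs.reverse lu = bs.reverse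
        · rw [if_pos heq, euPickR_cons,
            if_pos (by omega : mc < lu + euLenSum bs.reverse + (b.length : Int))]
          simp [heq]
        · rw [if_neg heq]
      rw [hrec, ih, hdrop]
    · rw [if_neg h]
      have hall : euPickR mc ((b :: bs).reverse) lu = (b :: bs).reverse := by
        apply euPickR_all
        rw [euLenSum_reverse]; omega
      rw [hall, List.reverse_reverse, euLenSum_reverse]

theorem euB_pick_cons (mc : Int) (u : String) (rest sel : List String) (t : Int) :
    euB_pick mc (u :: rest) sel t =
      if sel ≠ [] ∧ mc < t + (u.length : Int) then sel
      else euB_pick mc rest (sel ++ [u]) (t + (u.length : Int)) := rfl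

-- B's loop, once the selection is nonempty, is the backward pick
theorem euB_pick_eq (mc : Int) (xs : List String) : ∀ (sel : List String) (t : Int),
    sel ≠ [] → euB_pick mc xs sel t = sel ++ euPickR mc xs t := by
  induction xs with
  | nil => intro sel t _; simp [euB_pick, euPickR]
  | cons u rest ih =>
    intro sel t hsel
    rw [euB_pick_cons, euPickR_cons]
    by_cases h : mc < t + (u.length : Int)
    · rw [if_pos ⟨hsel, h⟩, if_pos h]
      simp
    · rw [if_neg (by tauto), if_neg h, ih (sel ++ [u]) (t + (u.length : Int)) (by simp)]
      simp

-- B's full pick from the empty selection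
theorem euB_pick_nil (mc : Int) (xs : List String) :
    euB_pick mc xs [] 0 =
      (match xs with
       | [] => []
       | u :: rest => u :: euPickR mc rest ((u.length : Int))) := by
  cases xs with
  | nil => rfl
  | cons u rest =>
    rw [euB_pick_cons, if_neg (by simp)]
    simp only [List.nil_append]
    rw [euB_pick_eq mc rest [u] (0 + (u.length : Int)) (by simp)]
    simp

-- A's eviction budget applied to B's full pick equals the pick with that budget
theorem euPickR_full (mc lu : Int) (hlu : 0 ≤ lu) (l : List String) :
    euPickR mc (euB_pick mc l [] 0) lu = euPickR mc l lu := by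
  rw [euB_pick_nil]
  cases l with
  | nil => rfl
  | cons v rr =>
    rw [euPickR_cons, euPickR_cons]
    by_cases h : mc < lu + (v.length : Int)
    · rw [if_pos h, if_pos h]
    · rw [if_neg h, if_neg h,
        euPickR_pickR mc rr ((v.length : Int)) (lu + (v.length : Int)) (by omega)]

-- the filtered fold of A over plain utterances
def euStep' (mc : Int) (st : List String × Int) (u : String) : List String × Int :=
  let lu := PySem.Str.len u
  let st2 := if st.2 + lu > mc then euA_while mc lu st.1 st.2 else st
  (st2.1 ++ [u], st2.2 + lu)

-- A's step, with the outer guard folded into the (idempotent) while loop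
theorem euStep'_eq (mc : Int) (buf : List String) (u : String) :
    euStep' mc (buf, euLenSum buf) u =
      ((euA_while mc (PySem.Str.len u) buf (euLenSum buf)).1 ++ [u],
       (euA_while mc (PySem.Str.len u) buf (euLenSum buf)).2 + PySem.Str.len u) := by
  unfold euStep'
  by_cases h : mc < euLenSum buf + PySem.Str.len u
  · simp only [gt_iff_lt, if_pos h]
  · have : euA_while mc (PySem.Str.len u) buf (euLenSum buf) = (buf, euLenSum buf) := by
      cases buf with
      | nil => rfl
      | cons b bs =>
        rw [euA_while_cons, if_neg (by simp only [PySem.Str.len_eq, String.length_toList] at h ⊢; omega)]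
    simp only [gt_iff_lt, if_neg h, this]

-- MAIN invariant: A's fold over the utterances equals B's backward selection
theorem euMain (mc : Int) (uts : List String) :
    uts.foldl (euStep' mc) ([], 0) =
      ((euB_pick mc uts.reverse [] 0).reverse, euLenSum (euB_pick mc uts.reverse [] 0)) := by
  induction uts using List.reverseRecOn with
  | nil => simp [euB_pick, euLenSum]
  | append_singleton p u ih =>
    rw [List.foldl_append, List.foldl_cons, List.foldl_nil, ih]
    have hlu : (0 : Int) ≤ PySem.Str.len u := by rw [PySem.Str.len_eq]; positivity
    have hls : euLenSum (euB_pick mc p.reverse [] 0) = euLenSum ((euB_pick mc p.reverse [] 0).reverse) :=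
      (euLenSum_reverse _).symm
    rw [hls, euStep'_eq, euA_while_eq, List.reverse_reverse, euPickR_full mc _ hlu p.reverse]
    have hrev : (p ++ [u]).reverse = u :: p.reverse := by simp
    rw [hrev, euB_pick_nil]
    simp only [List.reverse_cons, PySem.Str.len_eq, String.length_toList, euLenSum_cons]
    exact Prod.ext rfl (by ring)

-- A's fold over the conversation equals the fold of euStep' over the filtered utterances
theorem euFold_filter (mc : Int) (conv : List (List (String × String))) : ∀ st : List String × Int,
    conv.foldl (euA_step mc) st =
      ((conv.map (fun t => PySem.Str.strip (((PySem.Dict.mk t).get? "user_text").getD ""))).filter (· ≠ "")).foldl (euStep' mc) st := by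
  induction conv with
  | nil => intro st; rfl
  | cons t cs ih =>
    intro st
    by_cases h : PySem.Str.strip (((PySem.Dict.mk t).get? "user_text").getD "") = ""
    · simp only [List.foldl_cons, List.map_cons, List.filter_cons]
      rw [ih]
      simp [euA_step, h]
    · simp only [List.foldl_cons, List.map_cons, List.filter_cons]
      have : euA_step mc st t = euStep' mc st (PySem.Str.strip (((PySem.Dict.mk t).get? "user_text").getD "")) := by
        simp [euA_step, euStep', h]
      rw [this, ih]
      simp [h]

-- B's collection loop builds exactly the filtered utterance list
theorem euCollect (conv : List (List (String × String))) : ∀ acc : List String,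
    conv.foldl (fun acc t =>
        let ut := PySem.Str.strip (((PySem.Dict.mk t).get? "user_text").getD "")
        if ut = "" then acc else acc ++ [ut]) acc =
      acc ++ (conv.map (fun t => PySem.Str.strip (((PySem.Dict.mk t).get? "user_text").getD ""))).filter (· ≠ "") := by
  induction conv with
  | nil => intro acc; simp
  | cons t cs ih =>
    intro acc
    by_cases h : PySem.Str.strip (((PySem.Dict.mk t).get? "user_text").getD "") = ""
    · simp only [List.foldl_cons, List.map_cons, List.filter_cons]
      rw [ih]; simp [h]
    · simp only [List.foldl_cons, List.map_cons, List.filter_cons]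
      rw [ih]; simp [h]

-- ===== VERDICT (by name: the statement is the Claim_ definition above) =====
theorem extract_user_utterances_py_spec : Claim_equal_extract_user_utterances_py := by
  intro conversation_doc max_chars _
  unfold Spec_extract_user_utterances_py extract_user_utterances_py extract_user_utterances_py_alt
  simp only []
  set conv := (PySem.Dict.mk conversation_doc).getD "conversation" [] with hconv
  rw [euFold_filter max_chars conv ([], 0)]
  rw [euCollect conv []]
  simp only [List.nil_append]
  set uts := (conv.map (fun t => PySem.Str.strip (((PySem.Dict.mk t).get? "user_text").getD ""))).filter (· ≠ "") with huts
  rw [euMain max_chars uts]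
  simp only []
  set sel := euB_pick max_chars uts.reverse [] 0 with hsel
  by_cases h : sel = []
  · simp [h]
  · simp [h, List.reverse_eq_nil_iff]
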